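-- pv_equiv track=rewrite | github.com/theyeeman/advent-of-code-2022 | day1/p2.py | get_elf_calories
-- ===== SOURCE A (Python) =====
-- def get_elf_calories(inputs):
--     elf_calories = [0]
--     curr_elf = 0
--
--     for row in inputs:
--         if row == '':
--             elf_calories.append(0)
--             curr_elf += 1
--         else:
--             elf_calories[curr_elf] += int(row)
--
--     return elf_calories
-- ===== SOURCE B (Python) =====
-- def get_elf_calories(inputs):
--     # Partition the rows into groups first, then sum each group.
--     groups = [[]]
--     for row in inputs:
--         if row == '':
--             groups.append([])
--         else:
--             groups[-1].append(int(row))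
--     return [sum(g) for g in groups]
-- ===== Notes on version B (the rewrite author's own statement) =====
-- stated objective: alternative
-- what changed: Replaces the single running-sum pass that updates elf_calories[curr_elf] in place with a partitioning pass building a list of groups followed by a separate summing comprehension.
import Mathlib
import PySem

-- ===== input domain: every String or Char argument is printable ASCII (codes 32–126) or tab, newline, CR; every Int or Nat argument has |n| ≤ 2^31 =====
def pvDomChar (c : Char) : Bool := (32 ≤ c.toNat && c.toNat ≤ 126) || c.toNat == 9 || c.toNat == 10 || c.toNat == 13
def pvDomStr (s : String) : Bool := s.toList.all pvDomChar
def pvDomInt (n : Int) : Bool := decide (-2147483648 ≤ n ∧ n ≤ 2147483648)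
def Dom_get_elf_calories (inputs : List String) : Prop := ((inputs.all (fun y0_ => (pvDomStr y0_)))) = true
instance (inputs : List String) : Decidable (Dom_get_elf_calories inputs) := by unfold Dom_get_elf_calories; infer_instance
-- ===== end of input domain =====

-- B: partitions the rows into groups, then sums each group, instead of A's single
-- running-sum pass updating elf_calories[curr_elf] in place.

-- ===== PORT A =====
-- A's loop: state is (elf_calories, curr_elf); curr_elf is always ≥ 0, kept as Nat.
-- int(row) → (PySem.Int.ofStr? row).getD 0; rows where it is none (ValueError) are excluded by Pre_.
def pvGoA : List String → List Int → Nat → List Int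
  | [], elf_calories, _ => elf_calories
  | row :: rest, elf_calories, curr_elf =>
    if row == "" then pvGoA rest (elf_calories ++ [0]) (curr_elf + 1)
    else pvGoA rest (elf_calories.modify curr_elf (fun v => v + (PySem.Int.ofStr? row).getD 0)) curr_elf

def get_elf_calories (inputs : List String) : List Int :=
  pvGoA inputs [0] 0

-- ===== PORT B =====
-- B's loop: builds the list of groups; groups[-1].append(x) = dropLast ++ [last ++ [x]].
def pvGoB : List String → List (List Int) → List (List Int)
  | [], groups => groups
  | row :: rest, groups =>
    if row == "" then pvGoB rest (groups ++ [[]])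
    else pvGoB rest (groups.dropLast ++ [(groups.getLast?.getD []) ++ [(PySem.Int.ofStr? row).getD 0]])

def get_elf_calories_alt (inputs : List String) : List Int :=
  (pvGoB inputs [[]]).map List.sum

-- ===== PRECONDITION & SPEC =====
-- Pre_ excludes exactly the inputs on which A's int(row) raises ValueError (a non-blank
-- row that is not a Python int literal).
def Pre_get_elf_calories (inputs : List String) : Prop :=
  (inputs.all (fun r => r == "" || (PySem.Int.ofStr? r).isSome)) = true
instance (inputs : List String) : Decidable (Pre_get_elf_calories inputs) := by
  unfold Pre_get_elf_calories; infer_instance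
def pvWitness_get_elf_calories : List String := ["1", "2", "", " 30 ", "", "", "-4"]
def Spec_get_elf_calories (inputs : List String) (out : List Int) : Prop := out = get_elf_calories_alt inputs
instance (inputs : List String) (out : List Int) : Decidable (Spec_get_elf_calories inputs out) := by unfold Spec_get_elf_calories; infer_instance

-- ===== CLAIM (what is proved, stated in full; the proofs are below) =====
def Claim_equal_get_elf_calories : Prop := ∀ (inputs : List String), Dom_get_elf_calories inputs → Pre_get_elf_calories inputs → Spec_get_elf_calories inputs (get_elf_calories inputs)

-- ===== LEMMAS AND PROOFS =====

theorem pv_map_getLast : ∀ (gs : List (List Int)),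
    (gs.map List.sum).getLast? = gs.getLast?.map List.sum
  | [] => rfl
  | [_] => rfl
  | _ :: g :: t => by simpa using pv_map_getLast (g :: t)

theorem pv_map_dropLast : ∀ (gs : List (List Int)),
    (gs.map List.sum).dropLast = gs.dropLast.map List.sum
  | [] => rfl
  | [_] => rfl
  | _ :: g :: t => by simpa using pv_map_dropLast (g :: t)

-- modifying the last element of a nonempty list, spelled with dropLast/getLast?.
theorem pv_modify_last (f : Int → Int) :
    ∀ (xs : List Int), xs ≠ [] →
      xs.modify (xs.length - 1) f = xs.dropLast ++ [f (xs.getLast?.getD 0)]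
  | [], h => absurd rfl h
  | [x], _ => by simp [List.modify]
  | x :: y :: rest, _ => by
    have ih := pv_modify_last f (y :: rest) (by simp)
    have hstep : (x :: y :: rest).modify ((x :: y :: rest).length - 1) f
        = x :: (y :: rest).modify ((y :: rest).length - 1) f := by
      simp [List.modify_cons]
    rw [hstep, ih]
    simp

-- loop invariant: A's state is the element-wise sums of B's state, and A's index
-- points at the last group.
theorem pv_go_eq : ∀ (rest : List String) (gs : List (List Int)) (n : Nat),
    n + 1 = gs.length →
    pvGoA rest (gs.map List.sum) n = (pvGoB rest gs).map List.sum
  | [], _, _, _ => rfl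
  | row :: rest, gs, n, hn => by
    have hne : gs ≠ [] := by intro h; subst h; simp at hn
    simp only [pvGoA, pvGoB]
    by_cases hrow : row == ""
    · rw [if_pos hrow, if_pos hrow]
      have := pv_go_eq rest (gs ++ [[]]) (n + 1) (by simp [← hn])
      simpa using this
    · rw [if_neg hrow, if_neg hrow]
      set v : Int := (PySem.Int.ofStr? row).getD 0 with hv
      have hmapne : gs.map List.sum ≠ [] := by
        intro h; exact hne (by simpa using congrArg List.length h)
      have hn' : n = (gs.map List.sum).length - 1 := by simp [← hn]
      have hmod : (gs.map List.sum).modify n (fun x => x + v)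
          = (gs.map List.sum).dropLast ++ [(gs.map List.sum).getLast?.getD 0 + v] := by
        rw [hn']; exact pv_modify_last (fun x => x + v) _ hmapne
      have hlast : (gs.map List.sum).getLast?.getD 0 = List.sum (gs.getLast?.getD []) := by
        cases hg : gs.getLast? with
        | none => exact absurd (List.getLast?_eq_none_iff.mp hg) hne
        | some l => rw [pv_map_getLast]; simp [hg]
      have ih := pv_go_eq rest (gs.dropLast ++ [gs.getLast?.getD [] ++ [v]]) n (by
        have : gs.dropLast.length = gs.length - 1 := by simp
        simp [this, ← hn])
      rw [hmod, hlast, pv_map_dropLast, ← ih]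
      congr 1
      simp

-- ===== VERDICT (by name: the statement is the Claim_ definition above) =====
theorem get_elf_calories_spec : Claim_equal_get_elf_calories := by
  intro inputs _ _
  unfold Spec_get_elf_calories get_elf_calories get_elf_calories_alt
  have := pv_go_eq inputs [[]] 0 rfl
  simpa using this
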